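-- pv_equiv track=rewrite | github.com/wwwwodddd/Zukunft | keda/2496.py | F
-- ===== SOURCE A (Python) =====
-- p = 1000000007
--
-- def F(n): # return fib(n), fib(n+1)
-- 	if n == 0:
-- 		return 0, 1
-- 	if n & 1:
-- 		x, y = F(n - 1)
-- 		return (y, (x + y) % p)
-- 	else:
-- 		x, y = F(n >> 1)
-- 		return (2 * y - x) * x % p, (x * x + y * y) % p
-- ===== SOURCE B (Python) =====
-- p = 1000000007
--
-- def F(n): # return fib(n), fib(n+1)
--     a, b = 0, 1
--     for bit in bin(n)[2:]:
--         c = a * (2 * b - a) % p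
--         d = (a * a + b * b) % p
--         if int(bit):
--             a, b = d, (c + d) % p
--         else:
--             a, b = c, d
--     return a, b
-- ===== Notes on version B (the rewrite author's own statement) =====
-- stated objective: alternative
-- what changed: Replaces A's recursion (odd step via F(n-1), even step via F(n>>1)) with an iterative fast-doubling loop over the binary digits of n from MSB to LSB, maintaining (fib(k), fib(k+1)) in an accumulator with no recursion and no separate add-one step.
import Mathlib
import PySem

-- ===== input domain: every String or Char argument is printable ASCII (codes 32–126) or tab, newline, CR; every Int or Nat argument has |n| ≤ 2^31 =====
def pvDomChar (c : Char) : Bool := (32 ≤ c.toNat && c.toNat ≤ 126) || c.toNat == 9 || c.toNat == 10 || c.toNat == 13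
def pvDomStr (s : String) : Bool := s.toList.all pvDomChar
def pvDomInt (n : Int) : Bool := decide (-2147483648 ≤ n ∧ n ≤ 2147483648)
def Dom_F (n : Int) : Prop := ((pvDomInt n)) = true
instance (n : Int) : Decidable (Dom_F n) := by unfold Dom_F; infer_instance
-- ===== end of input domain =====

-- B replaces A's recursive fast-doubling (with a separate add-one step for odd n) by an
-- iterative MSB-to-LSB loop over bin(n)'s digits maintaining (fib k, fib k+1); same cost, no recursion.

-- ===== PORT A =====
-- literal port of A; the `n ≤ 0` guard only makes the recursion total: Python checks
-- `n == 0` and diverges on negative n, which Pre_F excludes.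
def F (n : Int) : Int × Int :=
  if _h : n ≤ 0 then (0, 1)
  else if PySem.Int.band n 1 ≠ 0 then
    let xy := F (n - 1)
    (xy.2, PySem.Int.mod (xy.1 + xy.2) 1000000007)
  else
    let xy := F (PySem.Int.floordiv n 2)  -- n >> 1 = n // 2
    (PySem.Int.mod ((2 * xy.2 - xy.1) * xy.1) 1000000007,
     PySem.Int.mod (xy.1 * xy.1 + xy.2 * xy.2) 1000000007)
termination_by n.toNat
decreasing_by
  · omega
  · rw [PySem.Int.floordiv_eq_ediv_of_pos (by norm_num)]; omega

-- ===== PORT B =====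
-- port of Python's bin(n)[2:] for n ≥ 0, as the list of binary digits (ints), MSB first
def binLoop (m : Int) (acc : List Int) : List Int :=
  if 0 < m then binLoop (PySem.Int.floordiv m 2) (acc ++ [PySem.Int.band m 1]) else acc
termination_by m.toNat
decreasing_by
  rw [PySem.Int.floordiv_eq_ediv_of_pos (by norm_num)]; omega

def binDigits (n : Int) : List Int :=
  if n = 0 then [0] else (binLoop n []).reverse

-- the body of B's `for bit in bin(n)[2:]` loop (`int(bit)` truthiness = digit ≠ 0)
def stepB (st : Int × Int) (bit : Int) : Int × Int :=
  let c := PySem.Int.mod (st.1 * (2 * st.2 - st.1)) 1000000007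
  let d := PySem.Int.mod (st.1 * st.1 + st.2 * st.2) 1000000007
  if bit ≠ 0 then (d, PySem.Int.mod (c + d) 1000000007) else (c, d)

def F_alt (n : Int) : Int × Int := (binDigits n).foldl stepB (0, 1)

-- ===== PRECONDITION & SPEC =====
-- Pre_F excludes negative n, on which Python A recurses forever (RecursionError)
-- and B raises ValueError (int('b') on bin(n)[2:]).
def Pre_F (n : Int) : Prop := 0 ≤ n
instance (n : Int) : Decidable (Pre_F n) := by unfold Pre_F; infer_instance
def pvWitness_F : Int := 10

def Spec_F (n : Int) (out : Int × Int) : Prop := out = F_alt n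
instance (n : Int) (out : Int × Int) : Decidable (Spec_F n out) := by unfold Spec_F; infer_instance

-- ===== CLAIM (what is proved, stated in full; the proofs are below) =====
def Claim_equal_F : Prop := ∀ (n : Int), Dom_F n → Pre_F n → Spec_F n (F n)

-- ===== LEMMAS AND PROOFS =====

-- the common invariant value: (fib k, fib (k+1)) mod p
def fp (k : Nat) : Int × Int := ((Nat.fib k : Int) % 1000000007, (Nat.fib (k+1) : Int) % 1000000007)

theorem emod_modeq (a : Int) : Int.ModEq 1000000007 (a % 1000000007) a :=
  Int.emod_emod_of_dvd a dvd_rfl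

theorem fib_two_mul_int (m : Nat) :
    (Nat.fib (2*m) : Int) = (Nat.fib m : Int) * (2 * (Nat.fib (m+1) : Int) - Nat.fib m) := by
  have h := Nat.fib_two_mul m
  have hle : Nat.fib m ≤ 2 * Nat.fib (m+1) := by
    have := Nat.fib_le_fib_succ (n := m); omega
  have h2 : ((Nat.fib (2*m) : Nat) : Int) = ((Nat.fib m * (2 * Nat.fib (m+1) - Nat.fib m) : Nat) : Int) :=
    congrArg (Nat.cast (R := Int)) h
  rw [h2]; push_cast [hle]; ring

theorem fib_two_mul_add_one_int (m : Nat) :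
    (Nat.fib (2*m+1) : Int) = (Nat.fib m : Int) * Nat.fib m + (Nat.fib (m+1) : Int) * Nat.fib (m+1) := by
  have h := Nat.fib_two_mul_add_one m
  have h2 : ((Nat.fib (2*m+1) : Nat) : Int) = ((Nat.fib (m+1) ^ 2 + Nat.fib m ^ 2 : Nat) : Int) :=
    congrArg (Nat.cast (R := Int)) h
  rw [h2]; push_cast; ring

-- the two doubling components, computed from reduced residues
theorem dbl_fst (m : Nat) :
    ((Nat.fib m : Int) % 1000000007 * (2 * ((Nat.fib (m+1) : Int) % 1000000007) - (Nat.fib m : Int) % 1000000007)) % 1000000007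
      = (Nat.fib (2*m) : Int) % 1000000007 := by
  rw [fib_two_mul_int]
  exact (emod_modeq _).mul (((emod_modeq _).mul_left 2).sub (emod_modeq _))

theorem dbl_snd (m : Nat) :
    ((Nat.fib m : Int) % 1000000007 * ((Nat.fib m : Int) % 1000000007)
     + (Nat.fib (m+1) : Int) % 1000000007 * ((Nat.fib (m+1) : Int) % 1000000007)) % 1000000007
      = (Nat.fib (2*m+1) : Int) % 1000000007 := by
  rw [fib_two_mul_add_one_int]
  exact ((emod_modeq _).mul (emod_modeq _)).add ((emod_modeq _).mul (emod_modeq _))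

theorem dbl_add (m : Nat) :
    ((Nat.fib (2*m) : Int) % 1000000007 + (Nat.fib (2*m+1) : Int) % 1000000007) % 1000000007
      = (Nat.fib (2*m+2) : Int) % 1000000007 := by
  have h : (Nat.fib (2*m+2) : Int) = (Nat.fib (2*m) : Int) + (Nat.fib (2*m+1) : Int) := by
    rw [Nat.fib_add_two]; push_cast; ring
  rw [h]
  exact (emod_modeq _).add (emod_modeq _)

theorem stepB_zero (st : Int × Int) :
    stepB st 0 = (PySem.Int.mod (st.1 * (2 * st.2 - st.1)) 1000000007,
                  PySem.Int.mod (st.1 * st.1 + st.2 * st.2) 1000000007) := by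
  simp [stepB]

theorem stepB_one (st : Int × Int) :
    stepB st 1 = (PySem.Int.mod (st.1 * st.1 + st.2 * st.2) 1000000007,
                  PySem.Int.mod (PySem.Int.mod (st.1 * (2 * st.2 - st.1)) 1000000007
                                 + PySem.Int.mod (st.1 * st.1 + st.2 * st.2) 1000000007) 1000000007) := by
  simp [stepB]

theorem mod_pos_eq (a : Int) : PySem.Int.mod a 1000000007 = a % 1000000007 :=
  PySem.Int.mod_eq_emod_of_pos (by norm_num)

theorem dbl_c (m : Nat) :
    PySem.Int.mod ((fp m).1 * (2 * (fp m).2 - (fp m).1)) 1000000007 = (Nat.fib (2*m) : Int) % 1000000007 := by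
  simp only [fp, mod_pos_eq]; exact dbl_fst m

theorem dbl_d (m : Nat) :
    PySem.Int.mod ((fp m).1 * (fp m).1 + (fp m).2 * (fp m).2) 1000000007 = (Nat.fib (2*m+1) : Int) % 1000000007 := by
  simp only [fp, mod_pos_eq]; exact dbl_snd m

theorem stepB_fp (m : Nat) (b : Nat) (hb : b < 2) :
    stepB (fp m) (b : Int) = fp (2*m + b) := by
  interval_cases b
  · rw [Nat.cast_zero, stepB_zero, dbl_c, dbl_d]
    rfl
  · rw [Nat.cast_one, stepB_one, dbl_c, dbl_d, mod_pos_eq, dbl_add]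
    rfl

-- ===== A's side: F ↑k = fp k =====
theorem band_one_natCast (k : Nat) : PySem.Int.band (k : Int) 1 = ((k % 2 : Nat) : Int) := by
  rw [show (1:Int) = ((1:Nat) : Int) by norm_num, PySem.Int.band_natCast, Nat.and_one_is_mod]

theorem floordiv_two_natCast (k : Nat) : PySem.Int.floordiv (k : Int) 2 = ((k / 2 : Nat) : Int) := by
  exact_mod_cast PySem.Int.floordiv_natCast k 2

theorem F_eq_fp : ∀ k : Nat, F (k : Int) = fp k := by
  intro k
  induction k using Nat.strong_induction_on with
  | _ k ih =>
    rw [F]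
    by_cases h0 : k = 0
    · subst h0; norm_num [fp]
    · have hpos : 0 < k := Nat.pos_of_ne_zero h0
      rw [dif_neg (by exact_mod_cast Nat.not_le.mpr (by exact_mod_cast hpos) : ¬ (k:Int) ≤ 0)]
      by_cases hodd : k % 2 = 1
      · rw [if_pos (by rw [band_one_natCast, hodd]; norm_num)]
        have hcast : (k : Int) - 1 = ((k - 1 : Nat) : Int) := by omega
        rw [hcast, ih (k-1) (by omega)]
        refine Prod.ext ?_ ?_
        · simp only [fp]
          rw [show k - 1 + 1 = k from by omega]
        · simp only [fp, mod_pos_eq]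
          rw [← Int.add_emod]
          have h1 : (Nat.fib (k+1) : Int) = (Nat.fib (k-1) : Int) + (Nat.fib (k-1+1) : Int) := by
            rw [show k + 1 = (k-1) + 2 from by omega, Nat.fib_add_two]; push_cast; ring
          rw [h1]
      · rw [if_neg (by rw [band_one_natCast]; omega)]
        rw [floordiv_two_natCast, ih (k/2) (by omega)]
        refine Prod.ext ?_ ?_
        · have h := dbl_c (k/2)
          rw [mul_comm ((fp (k/2)).1)] at h
          simp only [fp] at h ⊢
          rw [h, show 2 * (k/2) = k from by omega]
        · have h := dbl_d (k/2)
          simp only [fp] at h ⊢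
          rw [h, show 2 * (k/2) + 1 = k + 1 from by omega]

-- ===== B's side =====
theorem binLoop_zero_acc (acc : List Int) : binLoop 0 acc = acc := by
  rw [binLoop]; norm_num

theorem binLoop_append : ∀ (k : Nat) (acc : List Int),
    binLoop (k : Int) acc = acc ++ binLoop (k : Int) [] := by
  intro k
  induction k using Nat.strong_induction_on with
  | _ k ih =>
    intro acc
    by_cases h0 : k = 0
    · subst h0
      simp [binLoop_zero_acc]
    · have hpos : (0:Int) < (k : Int) := by exact_mod_cast Nat.pos_of_ne_zero h0
      conv_lhs => rw [binLoop]
      conv_rhs => rw [binLoop]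
      rw [if_pos hpos, if_pos hpos, floordiv_two_natCast,
          ih (k/2) (by omega) (acc ++ [PySem.Int.band (k:Int) 1]),
          ih (k/2) (by omega) ([] ++ [PySem.Int.band (k:Int) 1])]
      simp

theorem binLoop_cons (k : Nat) (hk : 0 < k) :
    binLoop (k : Int) [] = ((k % 2 : Nat) : Int) :: binLoop ((k / 2 : Nat) : Int) [] := by
  conv_lhs => rw [binLoop]
  rw [if_pos (by exact_mod_cast hk), floordiv_two_natCast, band_one_natCast,
      binLoop_append (k/2)]
  simp

-- the foldl over the reversed LSB-first bit list computes fp k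
theorem foldl_binLoop_fp : ∀ k : Nat, (binLoop (k : Int) []).reverse.foldl stepB (0, 1) = fp k := by
  intro k
  induction k using Nat.strong_induction_on with
  | _ k ih =>
    by_cases h0 : k = 0
    · subst h0
      simp only [Nat.cast_zero, binLoop_zero_acc, List.reverse_nil, List.foldl_nil]
      norm_num [fp]
    · have hpos : 0 < k := Nat.pos_of_ne_zero h0
      have hstep := ih (k/2) (by omega)
      rw [binLoop_cons k hpos]
      rw [List.foldl_reverse] at hstep ⊢
      rw [List.foldr_cons, hstep, stepB_fp (k/2) (k % 2) (by omega),
          show 2 * (k/2) + k % 2 = k from by omega]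

theorem F_alt_eq_fp (k : Nat) : F_alt (k : Int) = fp k := by
  by_cases h0 : k = 0
  · subst h0
    show (binDigits 0).foldl stepB (0, 1) = fp 0
    rw [show binDigits 0 = [0] from rfl, List.foldl_cons, List.foldl_nil,
        show (0, 1) = fp 0 from rfl, show (0:Int) = ((0:Nat):Int) from rfl,
        stepB_fp 0 0 (by omega)]
  · have hne : (k : Int) ≠ 0 := by exact_mod_cast h0
    show (binDigits (k : Int)).foldl stepB (0, 1) = fp k
    rw [binDigits, if_neg hne, foldl_binLoop_fp]

-- ===== VERDICT (by name: the statement is the Claim_ definition above) =====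
theorem F_spec : Claim_equal_F := by
  intro n _ hpre
  unfold Spec_F
  unfold Pre_F at hpre
  have hk : n = ((n.toNat : Nat) : Int) := by omega
  rw [hk, F_eq_fp, F_alt_eq_fp]
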